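-- pv_equiv track=rewrite | github.com/miguelretroz/trybe-exercises | computer-science/36.2/exercises/servers_comunication/servers_comunication.py | servers_comunication
-- ===== SOURCE A (Python) =====
-- def get_element(line, row, matrix):
--     if line >= 0 and row >= 0:
--         try:
--             return matrix[line][row]
--         except IndexError:
--             return 0
--     else:
--         return 0
--
-- def servers_comunication(servers):
--     servers_comunication_count = 0
--
--     for line_index, servers_line in enumerate(servers):
--         for row_index, server in enumerate(servers_line):
--             if server:
--                 left = get_element(line_index, (row_index - 1), servers)
--                 right = get_element(line_index, (row_index + 1), servers)
--                 up = get_element((line_index - 1), row_index, servers)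
--                 down = get_element((line_index + 1), row_index, servers)
--
--                 if left or right or up or down:
--                     servers_comunication_count += 1
--
--     return servers_comunication_count
-- ===== SOURCE B (Python) =====
-- def servers_comunication(servers):
--     communicating = set()
--     for i, row in enumerate(servers):
--         for j in range(len(row) - 1):
--             if row[j] and row[j + 1]:
--                 communicating.add((i, j))
--                 communicating.add((i, j + 1))
--     for i in range(len(servers) - 1):
--         upper, lower = servers[i], servers[i + 1]
--         for j in range(min(len(upper), len(lower))):
--             if upper[j] and lower[j]:
--                 communicating.add((i, j))
--                 communicating.add((i + 1, j))
--     return len(communicating)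
-- ===== Notes on version B (the rewrite author's own statement) =====
-- stated objective: alternative
-- what changed: B replaces per-cell probing of all four neighbours through a try/except getter with two pair scans (horizontal pairs within each row, vertical pairs between consecutive rows) that collect communicating coordinates into a set and return its size.
import Mathlib
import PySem

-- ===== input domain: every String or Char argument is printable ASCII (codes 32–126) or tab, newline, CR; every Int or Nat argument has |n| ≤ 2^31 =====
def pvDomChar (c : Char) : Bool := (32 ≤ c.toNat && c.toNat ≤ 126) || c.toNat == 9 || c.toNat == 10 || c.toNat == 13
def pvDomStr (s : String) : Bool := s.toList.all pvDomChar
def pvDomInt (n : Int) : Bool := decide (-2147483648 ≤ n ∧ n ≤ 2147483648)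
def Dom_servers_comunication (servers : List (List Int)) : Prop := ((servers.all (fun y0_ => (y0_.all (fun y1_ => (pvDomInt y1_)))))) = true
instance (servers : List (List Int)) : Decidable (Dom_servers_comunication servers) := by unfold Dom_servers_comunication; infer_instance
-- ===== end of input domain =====

-- B replaces the per-cell four-neighbour probe (via a try/except getter) with two adjacent-pair
-- scans that collect communicating coordinates into a set; same asymptotic cost ("alternative").

-- ===== PORT A =====
def get_element (line row : Int) (matrix : List (List Int)) : Int :=
  if line ≥ 0 ∧ row ≥ 0 then
    match PySem.List.pyGet? matrix line with
    | some r =>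
      match PySem.List.pyGet? r row with
      | some v => v
      | none => 0            -- except IndexError: return 0
    | none => 0              -- except IndexError: return 0
  else 0

def servers_comunication (servers : List (List Int)) : Int :=
  (PySem.List.enumerate servers 0).foldl (fun acc p =>
    (PySem.List.enumerate p.2 0).foldl (fun acc2 q =>
      if q.2 ≠ 0 then
        let left := get_element p.1 (q.1 - 1) servers
        let right := get_element p.1 (q.1 + 1) servers
        let up := get_element (p.1 - 1) q.1 servers
        let down := get_element (p.1 + 1) q.1 servers
        if left ≠ 0 ∨ right ≠ 0 ∨ up ≠ 0 ∨ down ≠ 0 then acc2 + 1 else acc2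
      else acc2) acc) 0

-- ===== PORT B =====
def servers_comunication_alt (servers : List (List Int)) : Int :=
  let s1 : PySem.Set (Int × Int) :=
    (PySem.List.enumerate servers 0).foldl (fun s p =>
      (PySem.List.pyRange 0 (PySem.List.len p.2 - 1) 1).foldl (fun s j =>
        if PySem.List.pyGetD p.2 j 0 ≠ 0 ∧ PySem.List.pyGetD p.2 (j + 1) 0 ≠ 0 then
          PySem.Set.add (PySem.Set.add s (p.1, j)) (p.1, j + 1)
        else s) s) PySem.Set.empty
  let s2 : PySem.Set (Int × Int) :=
    (PySem.List.pyRange 0 (PySem.List.len servers - 1) 1).foldl (fun s i =>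
      let upper := PySem.List.pyGetD servers i []
      let lower := PySem.List.pyGetD servers (i + 1) []
      (PySem.List.pyRange 0 (min (PySem.List.len upper) (PySem.List.len lower)) 1).foldl (fun s j =>
        if PySem.List.pyGetD upper j 0 ≠ 0 ∧ PySem.List.pyGetD lower j 0 ≠ 0 then
          PySem.Set.add (PySem.Set.add s (i, j)) (i + 1, j)
        else s) s) s1
  PySem.Set.len s2

-- ===== PRECONDITION & SPEC =====
def Spec_servers_comunication (servers : List (List Int)) (out : Int) : Prop := out = servers_comunication_alt servers
instance (servers : List (List Int)) (out : Int) : Decidable (Spec_servers_comunication servers out) := by unfold Spec_servers_comunication; infer_instance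

-- ===== CLAIM (what is proved, stated in full; the proofs are below) =====
def Claim_equal_servers_comunication : Prop := ∀ (servers : List (List Int)), Dom_servers_comunication servers → Spec_servers_comunication servers (servers_comunication servers)


-- ===== LEMMAS AND PROOFS =====

-- the value at cell (i, j), with 0 outside the grid
def at2 (s : List (List Int)) (i j : Nat) : Int := (s.getD i []).getD j 0

-- cell (i, j) communicates horizontally / vertically
def memH (s : List (List Int)) (i j : Nat) : Prop :=
  at2 s i j ≠ 0 ∧ ((0 < j ∧ at2 s i (j - 1) ≠ 0) ∨ at2 s i (j + 1) ≠ 0)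

def memV (s : List (List Int)) (i j : Nat) : Prop :=
  at2 s i j ≠ 0 ∧ ((0 < i ∧ at2 s (i - 1) j ≠ 0) ∨ at2 s (i + 1) j ≠ 0)

-- A's per-cell condition, as a Bool
def pcell (s : List (List Int)) (i j : Nat) : Bool :=
  decide (at2 s i j ≠ 0 ∧ (((0 < j ∧ at2 s i (j - 1) ≠ 0) ∨ at2 s i (j + 1) ≠ 0) ∨
                           ((0 < i ∧ at2 s (i - 1) j ≠ 0) ∨ at2 s (i + 1) j ≠ 0)))

def coords (s : List (List Int)) : List (Nat × Nat) :=
  (List.range s.length).flatMap (fun i => (List.range (s.getD i []).length).map (fun j => (i, j)))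

theorem pcell_iff (s : List (List Int)) (i j : Nat) :
    pcell s i j = true ↔ memH s i j ∨ memV s i j := by
  simp only [pcell, memH, memV, decide_eq_true_eq]
  tauto

theorem at2_ne_bounds {s : List (List Int)} {i j : Nat} (h : at2 s i j ≠ 0) :
    i < s.length ∧ j < (s.getD i []).length := by
  unfold at2 at h
  constructor
  · by_contra hi
    rw [show s.getD i [] = [] from List.getD_eq_default s [] (by omega)] at h
    simp [List.getD] at h
  · by_contra hj
    rw [List.getD_eq_default _ _ (by omega)] at h
    exact h rfl

theorem mem_coords (s : List (List Int)) (c : Nat × Nat) :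
    c ∈ coords s ↔ c.1 < s.length ∧ c.2 < (s.getD c.1 []).length := by
  obtain ⟨i, j⟩ := c
  simp only [coords, List.mem_flatMap, List.mem_map, List.mem_range, Prod.mk.injEq]
  constructor
  · rintro ⟨a, ha, b, hb, rfl, rfl⟩; exact ⟨ha, hb⟩
  · rintro ⟨hi, hj⟩; exact ⟨i, hi, j, hj, rfl, rfl⟩

theorem getD_at2 {s : List (List Int)} {i : Nat} (hi : i < s.length) (k : Nat) :
    s[i].getD k 0 = at2 s i k := by
  unfold at2
  rw [List.getD_eq_getElem s [] hi]

theorem ge_nat (s : List (List Int)) (i j : Nat) :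
    get_element (i : Int) (j : Int) s = at2 s i j := by
  unfold get_element at2
  rw [if_pos ⟨Int.natCast_nonneg i, Int.natCast_nonneg j⟩, PySem.List.pyGet?_natCast]
  cases hi : s[i]? with
  | none =>
    have hlen : s.length ≤ i := by simpa using hi
    dsimp only
    rw [show s.getD i [] = [] from List.getD_eq_default s [] hlen]
    simp [List.getD]
  | some r =>
    dsimp only
    rw [PySem.List.pyGet?_natCast]
    have hr : s.getD i [] = r := by simp [List.getD, hi]
    rw [hr]
    cases hj : r[j]? with
    | none =>
      have hlen : r.length ≤ j := by simpa using hj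
      rw [List.getD_eq_default _ _ hlen]
    | some v => simp [List.getD, hj]

theorem ge_row_sub (s : List (List Int)) (i j : Nat) :
    get_element (i : Int) ((j : Int) - 1) s = if 0 < j then at2 s i (j - 1) else 0 := by
  cases j with
  | zero =>
    rw [if_neg (by omega)]
    unfold get_element
    rw [if_neg (by simp)]
  | succ k =>
    rw [if_pos (by omega)]
    have h : ((k + 1 : Nat) : Int) - 1 = (k : Int) := by push_cast; ring
    rw [h]
    simpa using ge_nat s i k

theorem ge_line_sub (s : List (List Int)) (i j : Nat) :
    get_element ((i : Int) - 1) (j : Int) s = if 0 < i then at2 s (i - 1) j else 0 := by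
  cases i with
  | zero =>
    rw [if_neg (by omega)]
    unfold get_element
    rw [if_neg (by simp)]
  | succ k =>
    rw [if_pos (by omega)]
    have h : ((k + 1 : Nat) : Int) - 1 = (k : Int) := by push_cast; ring
    rw [h]
    simpa using ge_nat s k j

theorem pcell_char (s : List (List Int)) (i k : Nat) :
    pcell s i k = true ↔ at2 s i k ≠ 0 ∧
      ((if 0 < k then at2 s i (k - 1) else 0) ≠ 0 ∨ at2 s i (k + 1) ≠ 0 ∨
       (if 0 < i then at2 s (i - 1) k else 0) ≠ 0 ∨ at2 s (i + 1) k ≠ 0) := by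
  simp only [pcell, decide_eq_true_eq]
  split_ifs with h1 h2 <;> simp <;> tauto

theorem A_eq_count (s : List (List Int)) :
    servers_comunication s = (((coords s).countP (fun c => pcell s c.1 c.2) : Nat) : Int) := by
  unfold servers_comunication
  rw [PySem.List.foldl_congr_mem _ _
      (fun acc p => acc +
        (((List.range p.2.length).countP (fun j => pcell s p.1.toNat j) : Nat) : Int)) 0 ?_]
  · rw [PySem.List.foldl_add, zero_add]
    rw [PySem.List.enumerate_eq_map_pyRange s [], PySem.List.len_eq,
        PySem.List.pyRange_zero_natCast, List.map_map, List.map_map]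
    unfold coords
    rw [List.countP_flatMap, Nat.cast_list_sum, List.map_map]
    apply congrArg List.sum
    apply List.map_congr_left
    intro i hi
    rw [List.mem_range] at hi
    simp only [Function.comp_apply, PySem.List.pyGetD_natCast, Int.toNat_natCast,
      List.countP_map]
    rfl
  · intro acc p hp
    rw [PySem.List.mem_enumerate_iff] at hp
    obtain ⟨i, hi, rfl⟩ := hp
    simp only [zero_add, Int.toNat_natCast]
    rw [PySem.List.enumerate_eq_map_pyRange s[i] 0, PySem.List.len_eq,
        PySem.List.pyRange_zero_natCast, List.map_map, List.foldl_map]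
    rw [PySem.List.foldl_congr_mem _ _
        (fun acc2 k => if pcell s i k = true then acc2 + 1 else acc2) acc ?_]
    · rw [PySem.List.foldl_ite_add_one (fun k => pcell s i k = true)]
      congr 1
      apply congrArg Nat.cast
      apply List.countP_congr
      intro k _
      simp
    · intro acc2 k hk
      rw [List.mem_range] at hk
      have hp1 : (k : Int) + 1 = ((k + 1 : Nat) : Int) := by push_cast; ring
      have hp2 : (i : Int) + 1 = ((i + 1 : Nat) : Int) := by push_cast; ring
      simp only [Function.comp_apply, PySem.List.pyGetD_natCast, getD_at2 hi,
        hp1, hp2, ge_row_sub, ge_line_sub, ge_nat]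
      by_cases hc : pcell s i k = true
      · obtain ⟨h0, hd⟩ := (pcell_char s i k).mp hc
        rw [if_pos h0, if_pos hd, if_pos hc]
      · rw [if_neg hc]
        rw [pcell_char] at hc
        by_cases h0 : at2 s i k ≠ 0
        · rw [if_pos h0, if_neg (fun hd => hc ⟨h0, hd⟩)]
        · rw [if_neg h0]

-- generic: membership through a fold when each step's membership is characterized
theorem mem_foldl_step {ι α : Type} (l : List ι) (F : List α → ι → List α) (C : ι → α → Prop)
    (hF : ∀ t i x, x ∈ F t i ↔ x ∈ t ∨ C i x) (t0 : List α) (x : α) :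
    x ∈ l.foldl F t0 ↔ x ∈ t0 ∨ ∃ i ∈ l, C i x := by
  induction l generalizing t0 with
  | nil => simp
  | cons a l ih =>
    rw [List.foldl_cons, ih, hF]
    constructor
    · rintro ((h | h) | ⟨i, hi, h⟩)
      · exact Or.inl h
      · exact Or.inr ⟨a, List.mem_cons_self, h⟩
      · exact Or.inr ⟨i, List.mem_cons_of_mem a hi, h⟩
    · rintro (h | ⟨i, hi, h⟩)
      · exact Or.inl (Or.inl h)
      · rcases List.mem_cons.mp hi with rfl | hi
        · exact Or.inl (Or.inr h)
        · exact Or.inr ⟨i, hi, h⟩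

theorem nodup_foldl_step {ι α : Type} (l : List ι) (F : List α → ι → List α)
    (hF : ∀ t i, t.Nodup → (F t i).Nodup) (t0 : List α) (h0 : t0.Nodup) :
    (l.foldl F t0).Nodup := by
  induction l generalizing t0 with
  | nil => exact h0
  | cons a l ih => exact ih _ (hF _ _ h0)

-- the two stages of B's set, named for the proofs (same terms as in the port)
def sH (servers : List (List Int)) : PySem.Set (Int × Int) :=
  (PySem.List.enumerate servers 0).foldl (fun s p =>
    (PySem.List.pyRange 0 (PySem.List.len p.2 - 1) 1).foldl (fun s j =>
      if PySem.List.pyGetD p.2 j 0 ≠ 0 ∧ PySem.List.pyGetD p.2 (j + 1) 0 ≠ 0 then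
        PySem.Set.add (PySem.Set.add s (p.1, j)) (p.1, j + 1)
      else s) s) PySem.Set.empty

def sAll (servers : List (List Int)) : PySem.Set (Int × Int) :=
  (PySem.List.pyRange 0 (PySem.List.len servers - 1) 1).foldl (fun s i =>
    let upper := PySem.List.pyGetD servers i []
    let lower := PySem.List.pyGetD servers (i + 1) []
    (PySem.List.pyRange 0 (min (PySem.List.len upper) (PySem.List.len lower)) 1).foldl (fun s j =>
      if PySem.List.pyGetD upper j 0 ≠ 0 ∧ PySem.List.pyGetD lower j 0 ≠ 0 then
        PySem.Set.add (PySem.Set.add s (i, j)) (i + 1, j)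
      else s) s) (sH servers)

theorem alt_eq_sAll (s : List (List Int)) :
    servers_comunication_alt s = PySem.Set.len (sAll s) := rfl

-- one pair-marking step: what it adds
theorem mem_pair_step {s : PySem.Set (Int × Int)} {c : Prop} [Decidable c]
    {u v x : Int × Int} :
    (x ∈ if c then PySem.Set.add (PySem.Set.add s u) v else s) ↔
      x ∈ s ∨ (c ∧ (x = u ∨ x = v)) := by
  split_ifs with h
  · simp only [PySem.Set.mem_add]
    tauto
  · tauto

theorem nodup_pair_step {s : PySem.Set (Int × Int)} {c : Prop} [Decidable c]
    {u v : Int × Int} (hs : List.Nodup s) :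
    List.Nodup (if c then PySem.Set.add (PySem.Set.add s u) v else s) := by
  split_ifs with h
  · exact PySem.Set.nodup_add _ _ (PySem.Set.nodup_add _ _ hs)
  · exact hs

theorem mem_sH (s : List (List Int)) (x : Int × Int) :
    x ∈ sH s ↔ ∃ i j : Nat, x = ((i : Int), (j : Int)) ∧ memH s i j := by
  unfold sH
  rw [mem_foldl_step _ _
    (fun p x => ∃ jj ∈ PySem.List.pyRange 0 (PySem.List.len p.2 - 1) 1,
      (PySem.List.pyGetD p.2 jj 0 ≠ 0 ∧ PySem.List.pyGetD p.2 (jj + 1) 0 ≠ 0) ∧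
      (x = (p.1, jj) ∨ x = (p.1, jj + 1)))
    (fun t p x => mem_foldl_step _ _
      (fun jj x => (PySem.List.pyGetD p.2 jj 0 ≠ 0 ∧ PySem.List.pyGetD p.2 (jj + 1) 0 ≠ 0) ∧
        (x = (p.1, jj) ∨ x = (p.1, jj + 1)))
      (fun t jj x => mem_pair_step) t x) PySem.Set.empty x]
  constructor
  · rintro (h | ⟨p, hp, jj, hjj, ⟨hA, hB⟩, hx⟩)
    · cases h
    · rw [PySem.List.mem_enumerate_iff] at hp
      obtain ⟨i, hi, rfl⟩ := hp
      simp only [zero_add] at hjj hA hB hx ⊢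
      rw [PySem.List.mem_pyRange_one, PySem.List.len_eq] at hjj
      obtain ⟨hjj0, hjjlt⟩ := hjj
      set k := jj.toNat with hk
      have hjk : jj = (k : Int) := by omega
      have hklt : k + 1 < s[i].length := by omega
      rw [hjk, PySem.List.pyGetD_natCast, getD_at2 hi] at hA
      have hc : (k : Int) + 1 = ((k + 1 : Nat) : Int) := by push_cast; ring
      rw [hjk, hc, PySem.List.pyGetD_natCast, getD_at2 hi] at hB
      rcases hx with rfl | rfl
      · exact ⟨i, k, by rw [hjk], hA, Or.inr hB⟩
      · refine ⟨i, k + 1, by rw [hjk, hc], hB, Or.inl ⟨by omega, ?_⟩⟩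
        simpa using hA
  · rintro ⟨i, j, rfl, h0, hd⟩
    obtain ⟨hi, hj⟩ := at2_ne_bounds h0
    right
    refine ⟨((i : Int), s[i]), ?_, ?_⟩
    · rw [PySem.List.mem_enumerate_iff]
      exact ⟨i, hi, by simp⟩
    rcases hd with ⟨hjpos, hl⟩ | hr
    · obtain ⟨_, hj'⟩ := at2_ne_bounds hl
      refine ⟨((j - 1 : Nat) : Int), ?_, ⟨?_, ?_⟩, Or.inr ?_⟩
      · rw [PySem.List.mem_pyRange_one, PySem.List.len_eq]
        constructor
        · positivity
        · have h2 : j < s[i].length := by rwa [List.getD_eq_getElem s [] hi] at hj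
          dsimp only
          omega
      · rw [PySem.List.pyGetD_natCast, getD_at2 hi]
        exact hl
      · have hc : ((j - 1 : Nat) : Int) + 1 = ((j : Nat) : Int) := by omega
        rw [hc, PySem.List.pyGetD_natCast, getD_at2 hi]
        exact h0
      · have hc : ((j - 1 : Nat) : Int) + 1 = ((j : Nat) : Int) := by omega
        rw [hc]
    · obtain ⟨_, hj'⟩ := at2_ne_bounds hr
      refine ⟨((j : Nat) : Int), ?_, ⟨?_, ?_⟩, Or.inl rfl⟩
      · rw [PySem.List.mem_pyRange_one, PySem.List.len_eq]
        constructor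
        · positivity
        · have h2 : j + 1 < s[i].length := by rwa [List.getD_eq_getElem s [] hi] at hj'
          dsimp only
          omega
      · rw [PySem.List.pyGetD_natCast, getD_at2 hi]
        exact h0
      · have hc : ((j : Nat) : Int) + 1 = ((j + 1 : Nat) : Int) := by push_cast; ring
        rw [hc, PySem.List.pyGetD_natCast, getD_at2 hi]
        exact hr

theorem mem_sAll (s : List (List Int)) (x : Int × Int) :
    x ∈ sAll s ↔ ∃ i j : Nat, x = ((i : Int), (j : Int)) ∧ (memH s i j ∨ memV s i j) := by
  unfold sAll
  rw [mem_foldl_step _ _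
    (fun ii x => ∃ jj ∈ PySem.List.pyRange 0
        (min (PySem.List.len (PySem.List.pyGetD s ii []))
             (PySem.List.len (PySem.List.pyGetD s (ii + 1) []))) 1,
      (PySem.List.pyGetD (PySem.List.pyGetD s ii []) jj 0 ≠ 0 ∧
       PySem.List.pyGetD (PySem.List.pyGetD s (ii + 1) []) jj 0 ≠ 0) ∧
      (x = (ii, jj) ∨ x = (ii + 1, jj)))
    (fun t ii x => mem_foldl_step _ _
      (fun jj x => (PySem.List.pyGetD (PySem.List.pyGetD s ii []) jj 0 ≠ 0 ∧
          PySem.List.pyGetD (PySem.List.pyGetD s (ii + 1) []) jj 0 ≠ 0) ∧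
        (x = (ii, jj) ∨ x = (ii + 1, jj)))
      (fun t jj x => mem_pair_step) t x) (sH s) x]
  rw [mem_sH]
  constructor
  · rintro (⟨i, j, rfl, h⟩ | ⟨ii, hii, jj, hjj, ⟨hA, hB⟩, hx⟩)
    · exact ⟨i, j, rfl, Or.inl h⟩
    · rw [PySem.List.mem_pyRange_one, PySem.List.len_eq] at hii
      obtain ⟨hii0, hiilt⟩ := hii
      set a := ii.toNat with ha
      have hia : ii = (a : Int) := by omega
      have hc : (a : Int) + 1 = ((a + 1 : Nat) : Int) := by push_cast; ring
      rw [hia, PySem.List.mem_pyRange_one] at hjj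
      obtain ⟨hjj0, hjjlt⟩ := hjj
      set k := jj.toNat with hk
      have hjk : jj = (k : Int) := by omega
      rw [hia, hjk, PySem.List.pyGetD_natCast, PySem.List.pyGetD_natCast] at hA
      rw [hia, hc, hjk, PySem.List.pyGetD_natCast, PySem.List.pyGetD_natCast] at hB
      have hA' : at2 s a k ≠ 0 := hA
      have hB' : at2 s (a + 1) k ≠ 0 := hB
      rcases hx with rfl | rfl
      · exact ⟨a, k, by rw [hia, hjk], Or.inr ⟨hA', Or.inr hB'⟩⟩
      · refine ⟨a + 1, k, by rw [hia, hc, hjk], Or.inr ⟨hB', Or.inl ⟨by omega, ?_⟩⟩⟩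
        simpa using hA'
  · rintro ⟨i, j, rfl, h | hv⟩
    · exact Or.inl ⟨i, j, rfl, h⟩
    · right
      obtain ⟨h0, hd⟩ := hv
      obtain ⟨hi, hj⟩ := at2_ne_bounds h0
      rcases hd with ⟨hipos, hu⟩ | hdn
      · obtain ⟨hi', hj'⟩ := at2_ne_bounds hu
        have hc : ((i - 1 : Nat) : Int) + 1 = ((i : Nat) : Int) := by omega
        refine ⟨((i - 1 : Nat) : Int), ?_, ((j : Nat) : Int), ?_, ⟨?_, ?_⟩, Or.inr ?_⟩
        · rw [PySem.List.mem_pyRange_one, PySem.List.len_eq]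
          constructor
          · positivity
          · omega
        · rw [PySem.List.mem_pyRange_one]
          refine ⟨by positivity, ?_⟩
          rw [hc, PySem.List.len_eq, PySem.List.len_eq, PySem.List.pyGetD_natCast,
            PySem.List.pyGetD_natCast]
          have h1 : j < (s.getD (i - 1) []).length := hj'
          have h2 : j < (s.getD i []).length := hj
          omega
        · rw [PySem.List.pyGetD_natCast, PySem.List.pyGetD_natCast]
          exact hu
        · rw [hc, PySem.List.pyGetD_natCast, PySem.List.pyGetD_natCast]
          exact h0
        · rw [hc]
      · obtain ⟨hi', hj'⟩ := at2_ne_bounds hdn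
        have hc : ((i : Nat) : Int) + 1 = ((i + 1 : Nat) : Int) := by push_cast; ring
        refine ⟨((i : Nat) : Int), ?_, ((j : Nat) : Int), ?_, ⟨?_, ?_⟩, Or.inl rfl⟩
        · rw [PySem.List.mem_pyRange_one, PySem.List.len_eq]
          refine ⟨by positivity, by omega⟩
        · rw [PySem.List.mem_pyRange_one]
          refine ⟨by positivity, ?_⟩
          rw [hc, PySem.List.len_eq, PySem.List.len_eq, PySem.List.pyGetD_natCast,
            PySem.List.pyGetD_natCast]
          have h1 : j < (s.getD i []).length := hj
          have h2 : j < (s.getD (i + 1) []).length := hj'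
          omega
        · rw [PySem.List.pyGetD_natCast, PySem.List.pyGetD_natCast]
          exact h0
        · rw [hc, PySem.List.pyGetD_natCast, PySem.List.pyGetD_natCast]
          exact hdn

theorem nodup_sAll (s : List (List Int)) : (sAll s).Nodup := by
  unfold sAll
  apply nodup_foldl_step
  · intro t ii ht
    apply nodup_foldl_step
    · intro t' jj ht'
      exact nodup_pair_step ht'
    · exact ht
  · unfold sH
    apply nodup_foldl_step
    · intro t p ht
      apply nodup_foldl_step
      · intro t' jj ht'
        exact nodup_pair_step ht'
      · exact ht
    · exact List.nodup_nil

theorem nodup_coords (s : List (List Int)) : (coords s).Nodup := by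
  unfold coords
  rw [List.nodup_flatMap]
  constructor
  · intro i _
    exact (List.nodup_range).map (fun a b h => by simpa using h)
  · apply List.Pairwise.imp ?_ (List.pairwise_lt_range)
    intro a b hab x hxa hxb
    simp only [List.mem_map, List.mem_range] at hxa hxb
    obtain ⟨j1, _, rfl⟩ := hxa
    obtain ⟨j2, _, h⟩ := hxb
    have := (Prod.mk.injEq _ _ _ _).mp h
    omega

theorem B_eq_count (s : List (List Int)) :
    servers_comunication_alt s = (((coords s).countP (fun c => pcell s c.1 c.2) : Nat) : Int) := by
  rw [alt_eq_sAll]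
  have hLnodup : (((coords s).filter (fun c => pcell s c.1 c.2)).map
      (fun c : Nat × Nat => ((c.1 : Int), (c.2 : Int)))).Nodup := by
    apply List.Nodup.map
    · intro a b h
      obtain ⟨h1, h2⟩ := (Prod.mk.injEq _ _ _ _).mp h
      exact Prod.ext (by exact_mod_cast h1) (by exact_mod_cast h2)
    · exact (nodup_coords s).filter _
  have hperm : (sAll s).Perm (((coords s).filter (fun c => pcell s c.1 c.2)).map
      (fun c : Nat × Nat => ((c.1 : Int), (c.2 : Int)))) := by
    rw [List.perm_ext_iff_of_nodup (nodup_sAll s) hLnodup]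
    intro x
    rw [mem_sAll]
    simp only [List.mem_map, List.mem_filter]
    constructor
    · rintro ⟨i, j, rfl, hij⟩
      refine ⟨(i, j), ⟨(mem_coords s (i, j)).mpr ?_, (pcell_iff s i j).mpr hij⟩, rfl⟩
      rcases hij with ⟨h0, _⟩ | ⟨h0, _⟩ <;> exact at2_ne_bounds h0
    · rintro ⟨⟨i, j⟩, ⟨_, hp⟩, rfl⟩
      exact ⟨i, j, rfl, (pcell_iff s i j).mp hp⟩
  have hlen : PySem.Set.len (sAll s) = ((sAll s).length : Int) := by
    simp [PySem.Set.len]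
  rw [hlen, hperm.length_eq, List.length_map, List.countP_eq_length_filter]

-- ===== VERDICT (by name: the statement is the Claim_ definition above) =====
theorem servers_comunication_spec : Claim_equal_servers_comunication := by
  intro s _
  unfold Spec_servers_comunication
  rw [A_eq_count, B_eq_count]
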